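-- pv_equiv track=rewrite | github.com/COL-IU/ClonalTREE | myutils.py | black_list
-- ===== SOURCE A (Python) =====
-- def black_list(variants, clones):
--     out = {}
--     for variant in variants:
--         out[variant] = set()
--     clones_sets = list(map(set, clones))
--     for i in range(0, len(clones_sets)-1):
--         clone1 = clones_sets[i]
--         for j in range(i+1, len(clones_sets)):
--             clone2 = clones_sets[j]
--             inter = clone1.intersection(clone2)
--             if len(inter) > 0:
--                 sym_diff = clone1.symmetric_difference(clone2)
--                 for variant in sym_diff:
--                     out[variant].update(inter)
--     return out
-- ===== SOURCE B (Python) =====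
-- def black_list(variants, clones):
--     out = {variant: set() for variant in variants}
--     # group clones (as sets) by the elements they contain
--     containing = {}
--     clones_sets = list(map(set, clones))
--     for clone in clones_sets:
--         for e in clone:
--             containing.setdefault(e, []).append(clone)
--     # an element e shared by >= 2 clones of its group lands in out[v] exactly
--     # for the v that are in some clone of the group but not in all of them
--     for e, group in containing.items():
--         if len(group) < 2:
--             continue
--         union = set().union(*group)
--         inter = set.intersection(*group)
--         for v in union - inter:
--             out[v].add(e)
--     return out
-- ===== Notes on version B (the rewrite author's own statement) =====
-- stated objective: faster
-- what changed: Instead of scanning all O(C^2) clone pairs and updating every symmetric-difference variant per pair, B builds one element->clones-containing-it index in a single pass and, per shared element, adds it to out[v] exactly for the v in the group's union minus its intersection.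
import Mathlib
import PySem

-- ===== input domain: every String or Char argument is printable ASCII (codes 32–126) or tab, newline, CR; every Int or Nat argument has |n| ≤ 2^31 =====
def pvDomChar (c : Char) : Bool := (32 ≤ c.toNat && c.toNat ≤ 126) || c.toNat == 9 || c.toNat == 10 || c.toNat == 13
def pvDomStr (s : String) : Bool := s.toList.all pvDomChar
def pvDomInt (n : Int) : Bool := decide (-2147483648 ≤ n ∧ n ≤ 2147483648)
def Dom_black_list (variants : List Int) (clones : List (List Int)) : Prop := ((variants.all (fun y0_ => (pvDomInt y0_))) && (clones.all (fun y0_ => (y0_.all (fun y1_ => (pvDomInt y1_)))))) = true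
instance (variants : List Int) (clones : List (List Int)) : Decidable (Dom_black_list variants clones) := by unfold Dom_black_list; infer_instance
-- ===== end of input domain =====

-- B replaces A's O(C^2) pairwise clone scan by one element->containing-clones index
-- (objective: faster). Python returns a dict of SETS; Python's set iteration order is
-- not modelled, so both ports return each value set's elements in sorted order — the
-- same canonical representative of the same set on both sides.

-- ===== PORT A =====
-- shared rendering of the returned dict-of-sets (each set in sorted order)
def pvCanon (d : PySem.Dict Int (PySem.Set Int)) : List (Int × List Int) :=
  d.items.map (fun p => (p.1, PySem.List.sorted p.2 (fun x => x)))

def black_list (variants : List Int) (clones : List (List Int)) : List (Int × List Int) :=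
  let out0 : PySem.Dict Int (PySem.Set Int) :=
    variants.foldl (fun d variant => d.insert variant PySem.Set.empty) PySem.Dict.empty
  let clones_sets : List (PySem.Set Int) := clones.map PySem.Set.ofList
  let out :=
    (PySem.List.pyRange 0 ((clones_sets.length : Int) - 1) 1).foldl (fun d i =>
      let clone1 := PySem.List.pyGetD clones_sets i []
      (PySem.List.pyRange (i + 1) (clones_sets.length : Int) 1).foldl (fun d j =>
        let clone2 := PySem.List.pyGetD clones_sets j []
        let inter := PySem.Set.inter clone1 clone2
        if 0 < PySem.Set.len inter then
          let sym_diff := PySem.Set.symmDiff clone1 clone2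
          -- out[variant].update(inter); the KeyError case (variant not a key) is excluded
          -- by Pre_black_list, so modify's default branch is never reached on admitted inputs
          sym_diff.foldl (fun d variant =>
            d.modify variant PySem.Set.empty (fun s => PySem.Set.update s inter)) d
        else d) d) out0
  pvCanon out

-- ===== PORT B =====
def black_list_alt (variants : List Int) (clones : List (List Int)) : List (Int × List Int) :=
  let out0 : PySem.Dict Int (PySem.Set Int) :=
    variants.foldl (fun d variant => d.insert variant PySem.Set.empty) PySem.Dict.empty
  let clones_sets : List (PySem.Set Int) := clones.map PySem.Set.ofList
  -- containing.setdefault(e, []).append(clone)  ==  containing[e] = containing.get(e, []) + [clone]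
  let containing : PySem.Dict Int (List (PySem.Set Int)) :=
    clones_sets.foldl (fun d clone =>
      clone.foldl (fun d e => d.modify e [] (fun g => g ++ [clone])) d) PySem.Dict.empty
  let out :=
    containing.items.foldl (fun d p =>
      if p.2.length < 2 then d
      else
        let union := p.2.foldl (fun u c => PySem.Set.union u c) PySem.Set.empty
        let inter := match p.2 with
          | [] => []
          | c :: rest => rest.foldl (fun i c => PySem.Set.inter i c) c
        -- out[v].add(e); KeyError likewise excluded by Pre_black_list
        (PySem.Set.diff union inter).foldl (fun d v =>
          d.modify v PySem.Set.empty (fun s => PySem.Set.add s p.1)) d) out0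
  pvCanon out

-- ===== PRECONDITION & SPEC =====
-- Pre_ excludes exactly the inputs where Python A raises KeyError: two clones that share
-- an element but where some variant of their symmetric difference is not listed in variants.
def Pre_black_list (variants : List Int) (clones : List (List Int)) : Prop :=
  ∀ c1 ∈ clones, ∀ c2 ∈ clones, (∃ x ∈ c1, x ∈ c2) → ∀ v ∈ c1, v ∉ c2 → v ∈ variants
instance (variants : List Int) (clones : List (List Int)) : Decidable (Pre_black_list variants clones) := by
  unfold Pre_black_list; infer_instance
def pvWitness_black_list : List Int × List (List Int) := ([1, 2, 3], [[1, 2], [2, 3]])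

def Spec_black_list (variants : List Int) (clones : List (List Int)) (out : List (Int × List Int)) : Prop := out = black_list_alt variants clones
instance (variants : List Int) (clones : List (List Int)) (out : List (Int × List Int)) : Decidable (Spec_black_list variants clones out) := by unfold Spec_black_list; infer_instance

-- ===== CLAIM (what is proved, stated in full; the proofs are below) =====
def Claim_equal_black_list : Prop := ∀ (variants : List Int) (clones : List (List Int)), Dom_black_list variants clones → Pre_black_list variants clones → Spec_black_list variants clones (black_list variants clones)

-- ===== LEMMAS AND PROOFS =====

-- the common characterisation of both results: e lands in out[v] iff two clones (as sets)
-- both contain e, one contains v and the other does not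
def pvHit (cs : List (PySem.Set Int)) (v e : Int) : Prop :=
  ∃ c ∈ cs, ∃ c' ∈ cs, e ∈ c ∧ e ∈ c' ∧ v ∈ c ∧ v ∉ c'

-- generic facts about folds over Int-keyed dicts -------------------------------------

theorem pv_foldl_mem {α : Type} (step : PySem.Dict Int (PySem.Set Int) → α → PySem.Dict Int (PySem.Set Int))
    (R : α → Int → Int → Prop)
    (h : ∀ d x v e, e ∈ (step d x).getD v PySem.Set.empty ↔ e ∈ d.getD v PySem.Set.empty ∨ R x v e)
    (L : List α) : ∀ (d : PySem.Dict Int (PySem.Set Int)) (v e : Int),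
      e ∈ (L.foldl step d).getD v PySem.Set.empty ↔ e ∈ d.getD v PySem.Set.empty ∨ ∃ x ∈ L, R x v e := by
  induction L with
  | nil => intro d v e; simp
  | cons x L ih =>
    intro d v e
    rw [List.foldl_cons, ih, h]
    constructor
    · rintro ((h1 | h1) | ⟨y, hy, h2⟩)
      · exact Or.inl h1
      · exact Or.inr ⟨x, List.mem_cons_self, h1⟩
      · exact Or.inr ⟨y, List.mem_cons_of_mem _ hy, h2⟩
    · rintro (h1 | ⟨y, hy, h2⟩)
      · exact Or.inl (Or.inl h1)
      · rcases List.mem_cons.mp hy with rfl | hy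
        · exact Or.inl (Or.inr h2)
        · exact Or.inr ⟨y, hy, h2⟩

theorem pv_foldl_keys {α ν : Type} (step : PySem.Dict Int ν → α → PySem.Dict Int ν) (K : List Int)
    (L : List α) (h : ∀ d x, x ∈ L → d.keys = K → (step d x).keys = K) :
    ∀ d, d.keys = K → (L.foldl step d).keys = K := by
  induction L with
  | nil => intro d hd; exact hd
  | cons x L ih =>
    intro d hd
    rw [List.foldl_cons]
    exact ih (fun d y hy hk => h d y (List.mem_cons_of_mem _ hy) hk) _
      (h d x List.mem_cons_self hd)

theorem pv_foldl_nodup {α : Type} (step : PySem.Dict Int (PySem.Set Int) → α → PySem.Dict Int (PySem.Set Int))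
    (h : ∀ d x, (∀ w, (d.getD w PySem.Set.empty).Nodup) → ∀ v, ((step d x).getD v PySem.Set.empty).Nodup)
    (L : List α) : ∀ (d : PySem.Dict Int (PySem.Set Int)),
      (∀ w, (d.getD w PySem.Set.empty).Nodup) → ∀ v, ((L.foldl step d).getD v PySem.Set.empty).Nodup := by
  induction L with
  | nil => intro d hd; exact hd
  | cons x L ih => intro d hd; rw [List.foldl_cons]; exact ih _ (h d x hd)

theorem pv_keys_modify_mem {ν : Type} (d : PySem.Dict Int ν) (w : Int) (d0 : ν) (f : ν → ν)
    (h : w ∈ d.keys) : (d.modify w d0 f).keys = d.keys := by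
  rw [PySem.Dict.keys_modify, PySem.Dict.keys_insert_of_contains]
  exact (PySem.Dict.contains_iff_mem_keys d w).mpr h

theorem pv_two_le {α : Type} {l : List α} {a b : α} (ha : a ∈ l) (hb : b ∈ l) (hab : a ≠ b) :
    2 ≤ l.length := by
  match l with
  | [] => simp at ha
  | [x] => simp at ha hb; subst ha; subst hb; exact absurd rfl hab
  | x :: y :: t => simp only [List.length_cons]; omega

-- the empty-valued initial dict out0 ------------------------------------------------

theorem pv_out0_getD_aux (l : List Int) :
    ∀ (d : PySem.Dict Int (PySem.Set Int)), (∀ w, d.getD w PySem.Set.empty = PySem.Set.empty) →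
      ∀ w, (l.foldl (fun d variant => d.insert variant (PySem.Set.empty : PySem.Set Int)) d).getD w PySem.Set.empty = PySem.Set.empty := by
  induction l with
  | nil => intro d hd; exact hd
  | cons x l ih =>
    intro d hd
    rw [List.foldl_cons]
    refine ih _ (fun w => ?_)
    rw [PySem.Dict.getD_insert]
    split_ifs with hw
    · rfl
    · exact hd w

theorem pv_out0_getD (variants : List Int) (w : Int) :
    ((variants.foldl (fun d variant => d.insert variant (PySem.Set.empty : PySem.Set Int)) PySem.Dict.empty).getD w PySem.Set.empty) = PySem.Set.empty :=
  pv_out0_getD_aux variants PySem.Dict.empty (fun w => PySem.Dict.getD_empty w _) w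

theorem pv_update_nil (l : List Int) : PySem.Set.update ([] : PySem.Set Int) l = PySem.Set.ofList l := by
  rw [PySem.Set.ofList_eq_foldl]; rfl

theorem pv_out0_keys (variants : List Int) :
    (variants.foldl (fun d variant => d.insert variant (PySem.Set.empty : PySem.Set Int)) PySem.Dict.empty).keys = PySem.Set.ofList variants := by
  rw [PySem.Dict.keys_foldl_insert variants (fun _ _ => (PySem.Set.empty : PySem.Set Int)) PySem.Dict.empty,
      PySem.Dict.keys_empty, pv_update_nil]

-- single modify steps ----------------------------------------------------------------

theorem pv_step_update (I : PySem.Set Int) (w : Int) (d : PySem.Dict Int (PySem.Set Int)) (v e : Int) :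
    e ∈ (d.modify w PySem.Set.empty (fun s => PySem.Set.update s I)).getD v PySem.Set.empty ↔
      e ∈ d.getD v PySem.Set.empty ∨ (v = w ∧ e ∈ I) := by
  rw [PySem.Dict.getD_modify]
  split_ifs with hv
  · subst hv; rw [PySem.Set.mem_update]; tauto
  · tauto

theorem pv_step_add (a : Int) (w : Int) (d : PySem.Dict Int (PySem.Set Int)) (v e : Int) :
    e ∈ (d.modify w PySem.Set.empty (fun s => PySem.Set.add s a)).getD v PySem.Set.empty ↔
      e ∈ d.getD v PySem.Set.empty ∨ (v = w ∧ e = a) := by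
  rw [PySem.Dict.getD_modify]
  split_ifs with hv
  · subst hv; rw [PySem.Set.mem_add]; tauto
  · tauto

-- A side -----------------------------------------------------------------------------

theorem pv_pair_char (c1 c2 : PySem.Set Int) (d : PySem.Dict Int (PySem.Set Int)) (v e : Int) :
    e ∈ ((if 0 < PySem.Set.len (PySem.Set.inter c1 c2) then
            (PySem.Set.symmDiff c1 c2).foldl
              (fun d variant => d.modify variant PySem.Set.empty (fun s => PySem.Set.update s (PySem.Set.inter c1 c2))) d
          else d).getD v PySem.Set.empty) ↔
      e ∈ d.getD v PySem.Set.empty ∨ (v ∈ PySem.Set.symmDiff c1 c2 ∧ e ∈ PySem.Set.inter c1 c2) := by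
  split_ifs with hg
  · rw [pv_foldl_mem _ (fun w v e => v = w ∧ e ∈ PySem.Set.inter c1 c2)
        (fun d w v e => pv_step_update (PySem.Set.inter c1 c2) w d v e) _ d v e]
    constructor
    · rintro (h1 | ⟨w, hw, rfl, h2⟩)
      · exact Or.inl h1
      · exact Or.inr ⟨hw, h2⟩
    · rintro (h1 | ⟨h1, h2⟩)
      · exact Or.inl h1
      · exact Or.inr ⟨v, h1, rfl, h2⟩
  · have hempty : PySem.Set.inter c1 c2 = [] := by
      rcases List.eq_nil_or_concat (PySem.Set.inter c1 c2) with h | ⟨l, a, h⟩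
      · exact h
      · exfalso; apply hg; rw [h]; simp [PySem.Set.len]
    rw [hempty]
    simp

theorem pvA_pair_hit (cs : List (PySem.Set Int)) {i j v e : Int} (hi : 0 ≤ i) (hij : i < j)
    (hjn : j < (cs.length : Int))
    (hv : v ∈ PySem.Set.symmDiff (PySem.List.pyGetD cs i []) (PySem.List.pyGetD cs j []))
    (he : e ∈ PySem.Set.inter (PySem.List.pyGetD cs i []) (PySem.List.pyGetD cs j [])) :
    pvHit cs v e := by
  have hj : (0 : Int) ≤ j := le_trans hi (le_of_lt hij)
  rw [PySem.List.pyGetD_of_nonneg _ _ hi, PySem.List.pyGetD_of_nonneg _ _ hj] at hv he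
  have hiN : i.toNat < cs.length := by omega
  have hjN : j.toNat < cs.length := by omega
  rw [List.getD_eq_getElem _ _ hiN, List.getD_eq_getElem _ _ hjN] at hv he
  rcases (PySem.Set.mem_inter _ _ _).mp he with ⟨he1, he2⟩
  rcases (PySem.Set.mem_symmDiff _ _ _).mp hv with ⟨hv1, hv2⟩ | ⟨hv1, hv2⟩
  · exact ⟨cs[i.toNat], List.getElem_mem hiN, cs[j.toNat], List.getElem_mem hjN, he1, he2, hv1, hv2⟩
  · exact ⟨cs[j.toNat], List.getElem_mem hjN, cs[i.toNat], List.getElem_mem hiN, he2, he1, hv1, hv2⟩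

theorem pvA_hit_pairs (cs : List (PySem.Set Int)) {v e : Int} (h : pvHit cs v e) :
    ∃ i ∈ PySem.List.pyRange 0 ((cs.length : Int) - 1) 1,
      ∃ j ∈ PySem.List.pyRange (i + 1) (cs.length : Int) 1,
        v ∈ PySem.Set.symmDiff (PySem.List.pyGetD cs i []) (PySem.List.pyGetD cs j []) ∧
          e ∈ PySem.Set.inter (PySem.List.pyGetD cs i []) (PySem.List.pyGetD cs j []) := by
  rcases h with ⟨c, hc, c', hc', he1, he2, hv1, hv2⟩
  rcases List.getElem_of_mem hc with ⟨a, ha, rfl⟩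
  rcases List.getElem_of_mem hc' with ⟨b, hb, rfl⟩
  have hab : a ≠ b := by rintro rfl; exact hv2 hv1
  -- use the smaller index first
  rcases Nat.lt_or_ge a b with hlt | hge
  · refine ⟨(a : Int), ?_, (b : Int), ?_, ?_, ?_⟩
    · rw [PySem.List.mem_pyRange_one]; omega
    · rw [PySem.List.mem_pyRange_one]; omega
    · rw [PySem.List.pyGetD_of_nonneg _ _ (by positivity), PySem.List.pyGetD_of_nonneg _ _ (by positivity)]
      simp only [Int.toNat_natCast]
      rw [List.getD_eq_getElem _ _ ha, List.getD_eq_getElem _ _ hb, PySem.Set.mem_symmDiff]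
      exact Or.inl ⟨hv1, hv2⟩
    · rw [PySem.List.pyGetD_of_nonneg _ _ (by positivity), PySem.List.pyGetD_of_nonneg _ _ (by positivity)]
      simp only [Int.toNat_natCast]
      rw [List.getD_eq_getElem _ _ ha, List.getD_eq_getElem _ _ hb, PySem.Set.mem_inter]
      exact ⟨he1, he2⟩
  · have hlt : b < a := by omega
    refine ⟨(b : Int), ?_, (a : Int), ?_, ?_, ?_⟩
    · rw [PySem.List.mem_pyRange_one]; omega
    · rw [PySem.List.mem_pyRange_one]; omega
    · rw [PySem.List.pyGetD_of_nonneg _ _ (by positivity), PySem.List.pyGetD_of_nonneg _ _ (by positivity)]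
      simp only [Int.toNat_natCast]
      rw [List.getD_eq_getElem _ _ hb, List.getD_eq_getElem _ _ ha, PySem.Set.mem_symmDiff]
      exact Or.inr ⟨hv1, hv2⟩
    · rw [PySem.List.pyGetD_of_nonneg _ _ (by positivity), PySem.List.pyGetD_of_nonneg _ _ (by positivity)]
      simp only [Int.toNat_natCast]
      rw [List.getD_eq_getElem _ _ hb, List.getD_eq_getElem _ _ ha, PySem.Set.mem_inter]
      exact ⟨he2, he1⟩

theorem pvA_getD (variants : List Int) (cs : List (PySem.Set Int)) (v e : Int) :
    e ∈ ((PySem.List.pyRange 0 ((cs.length : Int) - 1) 1).foldl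
          (fun d i =>
            (PySem.List.pyRange (i + 1) (cs.length : Int) 1).foldl
              (fun d j =>
                if 0 < PySem.Set.len (PySem.Set.inter (PySem.List.pyGetD cs i []) (PySem.List.pyGetD cs j [])) then
                  (PySem.Set.symmDiff (PySem.List.pyGetD cs i []) (PySem.List.pyGetD cs j [])).foldl
                    (fun d variant =>
                      d.modify variant PySem.Set.empty
                        (fun s => PySem.Set.update s (PySem.Set.inter (PySem.List.pyGetD cs i []) (PySem.List.pyGetD cs j [])))) d
                else d) d)
          (variants.foldl (fun d variant => d.insert variant PySem.Set.empty) PySem.Dict.empty)).getD v PySem.Set.empty ↔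
      pvHit cs v e := by
  rw [pv_foldl_mem _
      (fun i v e => ∃ j ∈ PySem.List.pyRange (i + 1) (cs.length : Int) 1,
        v ∈ PySem.Set.symmDiff (PySem.List.pyGetD cs i []) (PySem.List.pyGetD cs j []) ∧
          e ∈ PySem.Set.inter (PySem.List.pyGetD cs i []) (PySem.List.pyGetD cs j []))
      (fun d i v e => pv_foldl_mem _
        (fun j v e => v ∈ PySem.Set.symmDiff (PySem.List.pyGetD cs i []) (PySem.List.pyGetD cs j []) ∧
          e ∈ PySem.Set.inter (PySem.List.pyGetD cs i []) (PySem.List.pyGetD cs j []))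
        (fun d j v e => pv_pair_char (PySem.List.pyGetD cs i []) (PySem.List.pyGetD cs j []) d v e) _ d v e)
      _ _ v e]
  rw [pv_out0_getD variants v]
  simp only [PySem.Set.empty, List.not_mem_nil, false_or]
  constructor
  · rintro ⟨i, hi, j, hj, hv, he⟩
    rw [PySem.List.mem_pyRange_one] at hi hj
    exact pvA_pair_hit cs hi.1 (by omega) hj.2 hv he
  · exact pvA_hit_pairs cs

theorem pvHit_pre (variants : List Int) (clones : List (List Int)) (hPre : Pre_black_list variants clones)
    {v e : Int} (h : pvHit (clones.map PySem.Set.ofList) v e) : v ∈ variants := by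
  rcases h with ⟨c, hc, c', hc', he1, he2, hv1, hv2⟩
  rcases List.mem_map.mp hc with ⟨o, ho, rfl⟩
  rcases List.mem_map.mp hc' with ⟨o', ho', rfl⟩
  rw [PySem.Set.mem_ofList] at he1 he2 hv1
  have hv2' : v ∉ o' := fun h => hv2 ((PySem.Set.mem_ofList _ _).mpr h)
  exact hPre o ho o' ho' ⟨e, he1, he2⟩ v hv1 hv2'

theorem pvA_keys (variants : List Int) (clones : List (List Int)) (hPre : Pre_black_list variants clones) :
    ((PySem.List.pyRange 0 (((clones.map PySem.Set.ofList).length : Int) - 1) 1).foldl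
        (fun d i =>
          (PySem.List.pyRange (i + 1) ((clones.map PySem.Set.ofList).length : Int) 1).foldl
            (fun d j =>
              if 0 < PySem.Set.len (PySem.Set.inter (PySem.List.pyGetD (clones.map PySem.Set.ofList) i []) (PySem.List.pyGetD (clones.map PySem.Set.ofList) j [])) then
                (PySem.Set.symmDiff (PySem.List.pyGetD (clones.map PySem.Set.ofList) i []) (PySem.List.pyGetD (clones.map PySem.Set.ofList) j [])).foldl
                  (fun d variant =>
                    d.modify variant PySem.Set.empty
                      (fun s => PySem.Set.update s (PySem.Set.inter (PySem.List.pyGetD (clones.map PySem.Set.ofList) i []) (PySem.List.pyGetD (clones.map PySem.Set.ofList) j [])))) d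
              else d) d)
        (variants.foldl (fun d variant => d.insert variant PySem.Set.empty) PySem.Dict.empty)).keys = PySem.Set.ofList variants := by
  apply pv_foldl_keys _ _ _ ?_ _ (pv_out0_keys variants)
  intro d i hi hd
  apply pv_foldl_keys _ _ _ ?_ _ hd
  intro d j hj hd
  split_ifs with hg
  · apply pv_foldl_keys _ _ _ ?_ _ hd
    intro d w hw hd
    -- the modified key is a variant of an intersecting pair, so Pre_ puts it in variants
    have hwv : w ∈ variants := by
      have hne : PySem.Set.inter (PySem.List.pyGetD (clones.map PySem.Set.ofList) i []) (PySem.List.pyGetD (clones.map PySem.Set.ofList) j []) ≠ [] := by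
        intro h
        rw [h] at hg
        simp [PySem.Set.len] at hg
      rcases List.exists_mem_of_ne_nil _ hne with ⟨x, hx⟩
      rw [PySem.List.mem_pyRange_one] at hi hj
      have hhit : pvHit (clones.map PySem.Set.ofList) w x := pvA_pair_hit _ hi.1 (by omega) hj.2 hw hx
      exact pvHit_pre variants clones hPre hhit
    have hwk : w ∈ d.keys := by rw [hd, PySem.Set.mem_ofList]; exact hwv
    rw [pv_keys_modify_mem d w _ _ hwk]
    exact hd
  · exact hd

-- B side -----------------------------------------------------------------------------

theorem pv_cnt (y : PySem.Set Int) (l : List Int) (hl : l.Nodup) :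
    ∀ (d : PySem.Dict Int (List (PySem.Set Int))) (x : Int),
      (l.foldl (fun d e => d.modify e [] (fun g => g ++ [y])) d).getD x [] =
        d.getD x [] ++ (if x ∈ l then [y] else []) := by
  induction l with
  | nil => intro d x; simp
  | cons h t ih =>
    intro d x
    rw [List.foldl_cons, ih (List.Nodup.of_cons hl)]
    rw [PySem.Dict.getD_modify]
    by_cases hx : x = h
    · subst hx
      have hxt : x ∉ t := (List.nodup_cons.mp hl).1
      simp [hxt]
    · simp [hx, List.mem_cons]

theorem pvB_cont_getD (cs : List (PySem.Set Int)) (hc : ∀ c ∈ cs, List.Nodup c) :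
    ∀ (d : PySem.Dict Int (List (PySem.Set Int))) (x : Int),
      (cs.foldl (fun d clone => clone.foldl (fun d e => d.modify e [] (fun g => g ++ [clone])) d) d).getD x [] =
        d.getD x [] ++ cs.filter (fun c => decide (x ∈ c)) := by
  induction cs with
  | nil => intro d x; simp
  | cons c t ih =>
    intro d x
    rw [List.foldl_cons, ih (fun c hc' => hc c (List.mem_cons_of_mem _ hc')),
        pv_cnt c c (hc c List.mem_cons_self)]
    rw [List.filter_cons]
    by_cases hx : x ∈ c
    · simp [hx]
    · simp [hx]

theorem pvB_cont_keys (cs : List (PySem.Set Int)) :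
    ∀ (d : PySem.Dict Int (List (PySem.Set Int))),
      (cs.foldl (fun d clone => clone.foldl (fun d e => d.modify e [] (fun g => g ++ [clone])) d) d).keys =
        PySem.Set.update d.keys cs.flatten := by
  induction cs with
  | nil => intro d; rfl
  | cons c t ih =>
    intro d
    rw [List.foldl_cons, ih]
    have : (c.foldl (fun d e => d.modify e [] (fun g => g ++ [c])) d).keys = PySem.Set.update d.keys c :=
      PySem.Dict.keys_foldl_modify c [] (fun _ _ g => g ++ [c]) d
    rw [this]
    show List.foldl PySem.Set.add (List.foldl PySem.Set.add d.keys c) t.flatten =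
      List.foldl PySem.Set.add d.keys (c ++ t.flatten)
    rw [List.foldl_append]

theorem pv_mem_foldl_union (L : List (PySem.Set Int)) :
    ∀ (s : PySem.Set Int) (v : Int), v ∈ L.foldl (fun u c => PySem.Set.union u c) s ↔ v ∈ s ∨ ∃ c ∈ L, v ∈ c := by
  induction L with
  | nil => intro s v; simp
  | cons c t ih =>
    intro s v
    rw [List.foldl_cons, ih, PySem.Set.mem_union]
    constructor
    · rintro ((h | h) | ⟨c', hc', h⟩)
      · exact Or.inl h
      · exact Or.inr ⟨c, List.mem_cons_self, h⟩
      · exact Or.inr ⟨c', List.mem_cons_of_mem _ hc', h⟩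
    · rintro (h | ⟨c', hc', h⟩)
      · exact Or.inl (Or.inl h)
      · rcases List.mem_cons.mp hc' with rfl | hc'
        · exact Or.inl (Or.inr h)
        · exact Or.inr ⟨c', hc', h⟩

theorem pv_mem_foldl_inter (L : List (PySem.Set Int)) :
    ∀ (s : PySem.Set Int) (v : Int), v ∈ L.foldl (fun i c => PySem.Set.inter i c) s ↔ v ∈ s ∧ ∀ c ∈ L, v ∈ c := by
  induction L with
  | nil => intro s v; simp
  | cons c t ih =>
    intro s v
    rw [List.foldl_cons, ih, PySem.Set.mem_inter]
    constructor
    · rintro ⟨⟨h1, h2⟩, h3⟩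
      exact ⟨h1, fun c' hc' => by rcases List.mem_cons.mp hc' with rfl | hc'; exact h2; exact h3 c' hc'⟩
    · rintro ⟨h1, h2⟩
      exact ⟨⟨h1, h2 c List.mem_cons_self⟩, fun c' hc' => h2 c' (List.mem_cons_of_mem _ hc')⟩

-- v is in union(group) - inter(group) for the group of clones containing e  →  pvHit
theorem pvB_diff_hit (cs : List (PySem.Set Int)) {v e : Int}
    (hv : v ∈ PySem.Set.diff
        ((cs.filter (fun c => decide (e ∈ c))).foldl (fun u c => PySem.Set.union u c) PySem.Set.empty)
        (match cs.filter (fun c => decide (e ∈ c)) with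
          | [] => []
          | c :: rest => rest.foldl (fun i c => PySem.Set.inter i c) c)) :
    pvHit cs v e := by
  rcases (PySem.Set.mem_diff _ _ _).mp hv with ⟨hvU, hvI⟩
  rcases (pv_mem_foldl_union _ _ _).mp hvU with hvE | ⟨c, hc, hvc⟩
  · simp [PySem.Set.empty] at hvE
  · rcases List.mem_filter.mp hc with ⟨hcs, hec⟩
    have hec : e ∈ c := of_decide_eq_true hec
    -- find a group member not containing v
    rcases hLe : cs.filter (fun c => decide (e ∈ c)) with _ | ⟨c0, rest⟩
    · rw [hLe] at hc; simp at hc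
    · rw [hLe] at hvI
      have : ¬ (v ∈ c0 ∧ ∀ c' ∈ rest, v ∈ c') := fun h => hvI ((pv_mem_foldl_inter _ _ _).mpr h)
      by_cases hv0 : v ∈ c0
      · push_neg at this
        rcases this hv0 with ⟨c', hc', hvc'⟩
        have hc'L : c' ∈ cs.filter (fun c => decide (e ∈ c)) := by rw [hLe]; exact List.mem_cons_of_mem _ hc'
        rcases List.mem_filter.mp hc'L with ⟨hc's, hec'⟩
        exact ⟨c, hcs, c', hc's, hec, of_decide_eq_true hec', hvc, hvc'⟩
      · have hc0L : c0 ∈ cs.filter (fun c => decide (e ∈ c)) := by rw [hLe]; exact List.mem_cons_self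
        rcases List.mem_filter.mp hc0L with ⟨hc0s, hec0⟩
        exact ⟨c, hcs, c0, hc0s, hec, of_decide_eq_true hec0, hvc, hv0⟩

theorem pvB_hit_diff (cs : List (PySem.Set Int)) {v e : Int} (h : pvHit cs v e) :
    ¬ (cs.filter (fun c => decide (e ∈ c))).length < 2 ∧
      v ∈ PySem.Set.diff
        ((cs.filter (fun c => decide (e ∈ c))).foldl (fun u c => PySem.Set.union u c) PySem.Set.empty)
        (match cs.filter (fun c => decide (e ∈ c)) with
          | [] => []
          | c :: rest => rest.foldl (fun i c => PySem.Set.inter i c) c) := by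
  rcases h with ⟨c, hc, c', hc', he1, he2, hv1, hv2⟩
  have hcL : c ∈ cs.filter (fun c => decide (e ∈ c)) := List.mem_filter.mpr ⟨hc, decide_eq_true he1⟩
  have hc'L : c' ∈ cs.filter (fun c => decide (e ∈ c)) := List.mem_filter.mpr ⟨hc', decide_eq_true he2⟩
  have hne : c ≠ c' := fun h => hv2 (h ▸ hv1)
  constructor
  · have := pv_two_le hcL hc'L hne; omega
  · rw [PySem.Set.mem_diff]
    constructor
    · exact (pv_mem_foldl_union _ _ _).mpr (Or.inr ⟨c, hcL, hv1⟩)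
    · intro hvI
      rcases hLe : cs.filter (fun c => decide (e ∈ c)) with _ | ⟨c0, rest⟩
      · rw [hLe] at hcL; simp at hcL
      · rw [hLe] at hvI
        have hall : ∀ c'' ∈ c0 :: rest, v ∈ c'' := by
          rcases (pv_mem_foldl_inter _ _ _).mp hvI with ⟨h1, h2⟩
          intro c'' hc''
          rcases List.mem_cons.mp hc'' with rfl | hc''
          · exact h1
          · exact h2 c'' hc''
        rw [← hLe] at hall
        exact hv2 (hall c' hc'L)

theorem pvB_step (p : Int × List (PySem.Set Int)) (d : PySem.Dict Int (PySem.Set Int)) (v e : Int) :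
    e ∈ ((if p.2.length < 2 then d
          else
            (PySem.Set.diff (p.2.foldl (fun u c => PySem.Set.union u c) PySem.Set.empty)
                (match p.2 with
                  | [] => []
                  | c :: rest => rest.foldl (fun i c => PySem.Set.inter i c) c)).foldl
              (fun d v => d.modify v PySem.Set.empty (fun s => PySem.Set.add s p.1)) d).getD v PySem.Set.empty) ↔
      e ∈ d.getD v PySem.Set.empty ∨
        (¬ p.2.length < 2 ∧
          v ∈ PySem.Set.diff (p.2.foldl (fun u c => PySem.Set.union u c) PySem.Set.empty)
              (match p.2 with
                | [] => []
                | c :: rest => rest.foldl (fun i c => PySem.Set.inter i c) c) ∧ e = p.1) := by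
  split_ifs with hg
  · simp [hg]
  · rw [pv_foldl_mem _ (fun w v e => v = w ∧ e = p.1)
        (fun d w v e => pv_step_add p.1 w d v e) _ d v e]
    constructor
    · rintro (h1 | ⟨w, hw, rfl, rfl⟩)
      · exact Or.inl h1
      · exact Or.inr ⟨hg, hw, rfl⟩
    · rintro (h1 | ⟨_, h1, rfl⟩)
      · exact Or.inl h1
      · exact Or.inr ⟨v, h1, rfl, rfl⟩

theorem pvB_getD (variants : List Int) (clones : List (List Int)) (v e : Int) :
    e ∈ (((clones.map PySem.Set.ofList).foldl
            (fun d clone => clone.foldl (fun d e => d.modify e [] (fun g => g ++ [clone])) d) PySem.Dict.empty).items.foldl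
          (fun d p =>
            if p.2.length < 2 then d
            else
              (PySem.Set.diff (p.2.foldl (fun u c => PySem.Set.union u c) PySem.Set.empty)
                  (match p.2 with
                    | [] => []
                    | c :: rest => rest.foldl (fun i c => PySem.Set.inter i c) c)).foldl
                (fun d v => d.modify v PySem.Set.empty (fun s => PySem.Set.add s p.1)) d)
          (variants.foldl (fun d variant => d.insert variant PySem.Set.empty) PySem.Dict.empty)).getD v PySem.Set.empty ↔
      pvHit (clones.map PySem.Set.ofList) v e := by
  have hc : ∀ c ∈ clones.map PySem.Set.ofList, List.Nodup c := by
    intro c hc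
    rcases List.mem_map.mp hc with ⟨o, _, rfl⟩
    exact PySem.Set.nodup_ofList o
  have hkeys : ((clones.map PySem.Set.ofList).foldl
      (fun d clone => clone.foldl (fun d e => d.modify e [] (fun g => g ++ [clone])) d) PySem.Dict.empty).keys =
      PySem.Set.ofList (clones.map PySem.Set.ofList).flatten := by
    rw [pvB_cont_keys, PySem.Dict.keys_empty, pv_update_nil]
  have hnd : ((clones.map PySem.Set.ofList).foldl
      (fun d clone => clone.foldl (fun d e => d.modify e [] (fun g => g ++ [clone])) d) PySem.Dict.empty).keys.Nodup := by
    rw [hkeys]; exact PySem.Set.nodup_ofList _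
  rw [pv_foldl_mem _ _ (fun d p v e => pvB_step p d v e) _ _ v e]
  rw [pv_out0_getD variants v]
  simp only [PySem.Set.empty, List.not_mem_nil, false_or]
  constructor
  · rintro ⟨⟨k, g⟩, hp, hlen, hdiff, rfl⟩
    have hval : g = (clones.map PySem.Set.ofList).filter (fun c => decide (e ∈ c)) := by
      have hsome := PySem.Dict.get?_of_mem_items _ hp hnd
      have := PySem.Dict.getD_of_get?_eq_some _ (d0 := ([] : List (PySem.Set Int))) hsome
      rw [← this, pvB_cont_getD _ hc, PySem.Dict.getD_empty]
      simp
    rw [hval] at hdiff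
    exact pvB_diff_hit _ hdiff
  · intro h
    have hmem : ∃ c ∈ clones.map PySem.Set.ofList, e ∈ c := by
      rcases h with ⟨c, hc', _, _, he1, _, _, _⟩
      exact ⟨c, hc', he1⟩
    rcases pvB_hit_diff _ h with ⟨hlen, hdiff⟩
    refine ⟨(e, (clones.map PySem.Set.ofList).filter (fun c => decide (e ∈ c))), ?_, hlen, hdiff, rfl⟩
    have hek : e ∈ ((clones.map PySem.Set.ofList).foldl
        (fun d clone => clone.foldl (fun d e => d.modify e [] (fun g => g ++ [clone])) d) PySem.Dict.empty).keys := by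
      rw [hkeys, PySem.Set.mem_ofList, List.mem_flatten]
      exact hmem
    have hgd : ((clones.map PySem.Set.ofList).foldl
        (fun d clone => clone.foldl (fun d e => d.modify e [] (fun g => g ++ [clone])) d) PySem.Dict.empty).getD e [] =
        (clones.map PySem.Set.ofList).filter (fun c => decide (e ∈ c)) := by
      rw [pvB_cont_getD _ hc, PySem.Dict.getD_empty]; simp
    rw [PySem.Dict.items_eq_map_keys _ hnd ([] : List (PySem.Set Int))]
    exact List.mem_map.mpr ⟨e, hek, by rw [hgd]⟩

theorem pvB_keys (variants : List Int) (clones : List (List Int)) (hPre : Pre_black_list variants clones) :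
    (((clones.map PySem.Set.ofList).foldl
            (fun d clone => clone.foldl (fun d e => d.modify e [] (fun g => g ++ [clone])) d) PySem.Dict.empty).items.foldl
          (fun d p =>
            if p.2.length < 2 then d
            else
              (PySem.Set.diff (p.2.foldl (fun u c => PySem.Set.union u c) PySem.Set.empty)
                  (match p.2 with
                    | [] => []
                    | c :: rest => rest.foldl (fun i c => PySem.Set.inter i c) c)).foldl
                (fun d v => d.modify v PySem.Set.empty (fun s => PySem.Set.add s p.1)) d)
          (variants.foldl (fun d variant => d.insert variant PySem.Set.empty) PySem.Dict.empty)).keys = PySem.Set.ofList variants := by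
  have hc : ∀ c ∈ clones.map PySem.Set.ofList, List.Nodup c := by
    intro c hc
    rcases List.mem_map.mp hc with ⟨o, _, rfl⟩
    exact PySem.Set.nodup_ofList o
  have hnd : ((clones.map PySem.Set.ofList).foldl
      (fun d clone => clone.foldl (fun d e => d.modify e [] (fun g => g ++ [clone])) d) PySem.Dict.empty).keys.Nodup := by
    rw [pvB_cont_keys, PySem.Dict.keys_empty, pv_update_nil]
    exact PySem.Set.nodup_ofList _
  apply pv_foldl_keys _ _ _ ?_ _ (pv_out0_keys variants)
  intro d p hp hd
  obtain ⟨k, g⟩ := p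
  split_ifs with hg
  · exact hd
  · apply pv_foldl_keys _ _ _ ?_ _ hd
    intro d w hw hd
    have hwv : w ∈ variants := by
      have hval : g = (clones.map PySem.Set.ofList).filter (fun c => decide (k ∈ c)) := by
        have hsome := PySem.Dict.get?_of_mem_items _ hp hnd
        have := PySem.Dict.getD_of_get?_eq_some _ (d0 := ([] : List (PySem.Set Int))) hsome
        rw [← this, pvB_cont_getD _ hc, PySem.Dict.getD_empty]
        simp
      rw [hval] at hw
      exact pvHit_pre variants clones hPre (pvB_diff_hit _ hw)
    have hwk : w ∈ d.keys := by rw [hd, PySem.Set.mem_ofList]; exact hwv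
    rw [pv_keys_modify_mem d w _ _ hwk]
    exact hd

-- Nodup of all value sets ------------------------------------------------------------

theorem pvA_nodup (variants : List Int) (cs : List (PySem.Set Int)) (v : Int) :
    (((PySem.List.pyRange 0 ((cs.length : Int) - 1) 1).foldl
          (fun d i =>
            (PySem.List.pyRange (i + 1) (cs.length : Int) 1).foldl
              (fun d j =>
                if 0 < PySem.Set.len (PySem.Set.inter (PySem.List.pyGetD cs i []) (PySem.List.pyGetD cs j [])) then
                  (PySem.Set.symmDiff (PySem.List.pyGetD cs i []) (PySem.List.pyGetD cs j [])).foldl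
                    (fun d variant =>
                      d.modify variant PySem.Set.empty
                        (fun s => PySem.Set.update s (PySem.Set.inter (PySem.List.pyGetD cs i []) (PySem.List.pyGetD cs j [])))) d
                else d) d)
          (variants.foldl (fun d variant => d.insert variant PySem.Set.empty) PySem.Dict.empty)).getD v PySem.Set.empty).Nodup := by
  apply pv_foldl_nodup _ ?_ _ _ (fun w => by rw [pv_out0_getD]; exact List.nodup_nil) v
  intro d i hd
  apply pv_foldl_nodup _ ?_ _ _ hd
  intro d j hd v
  split_ifs with hg
  · apply pv_foldl_nodup _ ?_ _ _ hd v
    intro d w hd v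
    rw [PySem.Dict.getD_modify]
    split_ifs with hv
    · exact PySem.Set.nodup_update _ _ (hd w)
    · exact hd v
  · exact hd v

theorem pvB_nodup (variants : List Int) (L : List (Int × List (PySem.Set Int))) (v : Int) :
    ((L.foldl
          (fun d p =>
            if p.2.length < 2 then d
            else
              (PySem.Set.diff (p.2.foldl (fun u c => PySem.Set.union u c) PySem.Set.empty)
                  (match p.2 with
                    | [] => []
                    | c :: rest => rest.foldl (fun i c => PySem.Set.inter i c) c)).foldl
                (fun d v => d.modify v PySem.Set.empty (fun s => PySem.Set.add s p.1)) d)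
          (variants.foldl (fun d variant => d.insert variant PySem.Set.empty) PySem.Dict.empty)).getD v PySem.Set.empty).Nodup := by
  apply pv_foldl_nodup _ ?_ _ _ (fun w => by rw [pv_out0_getD]; exact List.nodup_nil) v
  intro d p hd v
  split_ifs with hg
  · exact hd v
  · apply pv_foldl_nodup _ ?_ _ _ hd v
    intro d w hd v
    rw [PySem.Dict.getD_modify]
    split_ifs with hv
    · exact PySem.Set.nodup_add _ _ (hd w)
    · exact hd v

-- assembling the two canonical renderings --------------------------------------------

theorem pvCanon_eq (d d' : PySem.Dict Int (PySem.Set Int)) (hk : d.keys = d'.keys) (hnd : d.keys.Nodup)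
    (hval : ∀ k, (d.getD k PySem.Set.empty).Nodup ∧ (d'.getD k PySem.Set.empty).Nodup ∧
      (∀ e, e ∈ d.getD k PySem.Set.empty ↔ e ∈ d'.getD k PySem.Set.empty)) : pvCanon d = pvCanon d' := by
  unfold pvCanon
  rw [PySem.Dict.items_eq_map_keys d hnd PySem.Set.empty,
      PySem.Dict.items_eq_map_keys d' (hk ▸ hnd) PySem.Set.empty, ← hk,
      List.map_map, List.map_map]
  apply List.map_congr_left
  intro k _
  simp only [Function.comp]
  congr 1
  apply PySem.List.sorted_eq_sorted_of_perm _ _ (fun x => x) (fun a b h => h)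
  exact (List.perm_ext_iff_of_nodup (hval k).1 (hval k).2.1).mpr (hval k).2.2

-- ===== VERDICT (by name: the statement is the Claim_ definition above) =====
theorem black_list_spec : Claim_equal_black_list := by
  intro variants clones _hDom hPre
  unfold Spec_black_list
  show black_list variants clones = black_list_alt variants clones
  simp only [black_list, black_list_alt]
  apply pvCanon_eq
  · rw [pvA_keys variants clones hPre, pvB_keys variants clones hPre]
  · rw [pvA_keys variants clones hPre]
    exact PySem.Set.nodup_ofList variants
  · intro k
    refine ⟨pvA_nodup variants _ k, pvB_nodup variants _ k, fun e => ?_⟩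
    rw [pvA_getD variants (clones.map PySem.Set.ofList) k e, pvB_getD variants clones k e]
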